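-- pv_equiv track=rewrite | github.com/HeilemannLab/SPTAnalyser | Scripts/timeResolvedAnalysis.py | sort_cells
-- ===== SOURCE A (Python) =====
-- def sort_cells(cells):
--     """
--     :param cells: a list of cell names
--     :return: cells sorted in alphanumerical order taking multi digit numbers into account
--     """
--     digits = [[]]
--     for cell in cells:
--         number = cell.split("_")[-1].split(".")[0]
--         while True:
--             try:
--                 digits[len(number)].append(cell)
--                 break
--             except IndexError:
--                 digits.append([])
--                 continue
--     sorted = []
--     for dig in digits:
--         dig.sort()
--         sorted += dig
--     return sorted
-- ===== SOURCE B (Python) =====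
-- def sort_cells(cells):
--     """
--     :param cells: a list of cell names
--     :return: cells sorted in alphanumerical order taking multi digit numbers into account
--     """
--     def number(cell):
--         return cell.split("_")[-1].split(".")[0]
--     return sorted(cells, key=lambda c: (len(number(c)), c))
-- ===== Notes on version B (the rewrite author's own statement) =====
-- stated objective: simpler
-- what changed: A builds a growable list-of-lists bucket table indexed by number-string length (growing it one bucket per caught IndexError), sorts each bucket and concatenates; B is a single stable sort of the input on the composite key (len(number), name).
import Mathlib
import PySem

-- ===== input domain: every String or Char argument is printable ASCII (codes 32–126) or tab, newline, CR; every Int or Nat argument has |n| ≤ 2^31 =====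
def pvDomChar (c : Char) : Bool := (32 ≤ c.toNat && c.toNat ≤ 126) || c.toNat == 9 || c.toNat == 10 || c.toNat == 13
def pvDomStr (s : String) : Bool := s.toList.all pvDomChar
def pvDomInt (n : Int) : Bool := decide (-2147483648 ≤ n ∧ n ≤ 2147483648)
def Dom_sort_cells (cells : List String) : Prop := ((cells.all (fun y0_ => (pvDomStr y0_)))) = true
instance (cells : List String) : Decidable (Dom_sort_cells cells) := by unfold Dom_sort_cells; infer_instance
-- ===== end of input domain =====

-- B replaces A's IndexError-driven bucket table (grow, fill, sort each bucket, concatenate)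
-- by a single stable sort on the composite key (len(number), name); objective: simpler.

-- ===== PORT A =====
-- cell.split("_")[-1].split(".")[0] — the same expression occurs verbatim in both Pythons.
-- split? with a nonempty separator always returns 'some' of a nonempty list, so getD/getLastD/headD defaults are never used.
def pvNum (cell : String) : String :=
  ((PySem.Str.split? (((PySem.Str.split? cell "_").getD []).getLastD "") ".").getD []).headD ""

-- the 'while True: try digits[n].append(cell) except IndexError: digits.append([])' loop
def pvGrowPut (digits : List (List String)) (n : Nat) (cell : String) : List (List String) :=
  if h : n < digits.length then digits.set n (digits[n] ++ [cell])
  else pvGrowPut (digits ++ [[]]) n cell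
termination_by n + 1 - digits.length
decreasing_by simp at h; simp; omega

def sort_cells (cells : List String) : List String :=
  let digits := cells.foldl (fun ds cell => pvGrowPut ds (PySem.Str.len (pvNum cell)).toNat cell) [[]]
  digits.foldl (fun acc dig => acc ++ PySem.List.sorted dig (fun x => x) false) []

-- ===== PORT B =====
def sort_cells_alt (cells : List String) : List String :=
  PySem.List.sorted2 cells (fun c => PySem.Str.len (pvNum c)) (fun c => c) false

-- ===== PRECONDITION & SPEC =====
def Spec_sort_cells (cells : List String) (out : List String) : Prop := out = sort_cells_alt cells
instance (cells : List String) (out : List String) : Decidable (Spec_sort_cells cells out) := by unfold Spec_sort_cells; infer_instance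

-- ===== CLAIM (what is proved, stated in full; the proofs are below) =====
def Claim_equal_sort_cells : Prop := ∀ (cells : List String), Dom_sort_cells cells → Spec_sort_cells cells (sort_cells cells)

-- ===== LEMMAS AND PROOFS =====

-- the composite key B sorts by, into the linear order ℤ ×ₗ String (Python's tuple comparison)
def pvKey (c : String) : Lex (Int × String) := toLex (PySem.Str.len (pvNum c), c)

def pvKlen (c : String) : Nat := (PySem.Str.len (pvNum c)).toNat

def pvMaxK (xs : List String) : Nat := xs.foldl (fun m c => max m (pvKlen c)) 0

lemma pvLen_nonneg (s : String) : 0 ≤ PySem.Str.len s := by simp [PySem.Str.len_eq]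

lemma pvKey_inj : Function.Injective pvKey := by
  intro a b h
  unfold pvKey at h
  exact congrArg Prod.snd (toLex.injective h)

-- B's sorted2 with keys (len∘pvNum, id) is a sort by the single Lex key pvKey
lemma alt_eq_sorted_lex (cells : List String) :
    sort_cells_alt cells = PySem.List.sorted cells pvKey false := by
  have h : (fun (a b : String) => decide (PySem.Str.len (pvNum a) < PySem.Str.len (pvNum b)) ||
        (!decide (PySem.Str.len (pvNum b) < PySem.Str.len (pvNum a)) && decide (a < b)))
      = (fun a b => decide (pvKey a < pvKey b)) := by
    funext a b
    rw [Bool.eq_iff_iff]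
    simp only [pvKey, Prod.Lex.toLex_lt_toLex, Bool.or_eq_true,
      Bool.and_eq_true, Bool.not_eq_eq_eq_not, Bool.not_true, decide_eq_true_eq,
      decide_eq_false_iff_not]
    constructor
    · rintro (h | ⟨h1, h2⟩)
      · exact Or.inl h
      · rcases lt_trichotomy (PySem.Str.len (pvNum a)) (PySem.Str.len (pvNum b)) with h' | h' | h'
        · exact Or.inl h'
        · exact Or.inr ⟨h', h2⟩
        · exact absurd h' h1
    · rintro (h | ⟨h1, h2⟩)
      · exact Or.inl h
      · exact Or.inr ⟨by omega, h2⟩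
  show List.foldl _ [] cells = List.foldl _ [] cells
  rw [h]

lemma pvGrowPut_of_lt (ds : List (List String)) (n : Nat) (c : String) (h : n < ds.length) :
    pvGrowPut ds n c = ds.set n (ds[n] ++ [c]) := by
  rw [pvGrowPut]; simp [h]

lemma pvGrowPut_of_le (ds : List (List String)) (n : Nat) (c : String) (h : ds.length ≤ n) :
    pvGrowPut ds n c = ds ++ List.replicate (n - ds.length) [] ++ [[c]] := by
  induction hk : n - ds.length generalizing ds with
  | zero =>
    have hl : ds.length = n := by omega
    rw [pvGrowPut]
    have h1 : ¬ n < ds.length := by omega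
    simp only [h1, dite_false]
    rw [pvGrowPut]
    have h2 : n < (ds ++ [[]]).length := by simp; omega
    simp only [h2, dite_true]
    subst hl
    simp [List.getElem_append_right, List.set_append_right]
  | succ k ih =>
    rw [pvGrowPut]
    have h1 : ¬ n < ds.length := by omega
    simp only [h1, dite_false]
    rw [ih (ds ++ [[]]) (by simp; omega) (by simp; omega)]
    simp [List.replicate_succ]

lemma pvMaxK_append (xs : List String) (c : String) :
    pvMaxK (xs ++ [c]) = max (pvMaxK xs) (pvKlen c) := by
  simp [pvMaxK]

lemma pvMaxK_bound (xs : List String) : ∀ x ∈ xs, pvKlen x ≤ pvMaxK xs :=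
  (PySem.List.le_foldl_max_nat xs pvKlen 0).2

lemma fold_eq_buckets (xs : List String) :
    xs.foldl (fun ds cell => pvGrowPut ds (PySem.Str.len (pvNum cell)).toNat cell) [[]]
    = (List.range (pvMaxK xs + 1)).map (fun i => xs.filter (fun c => pvKlen c == i)) := by
  induction xs using List.reverseRecOn with
  | nil => rfl
  | append_singleton xs c ih =>
    rw [List.foldl_append, List.foldl_cons, List.foldl_nil, ih, pvMaxK_append]
    show pvGrowPut _ (pvKlen c) c = _
    by_cases hk : pvKlen c ≤ pvMaxK xs
    · rw [pvGrowPut_of_lt _ _ _ (by simp; omega)]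
      rw [show max (pvMaxK xs) (pvKlen c) = pvMaxK xs from by omega]
      apply List.ext_getElem (by simp)
      intro i h1 h2
      simp only [List.getElem_set, List.getElem_map, List.getElem_range,
        List.filter_append, List.length_map, List.length_range] at h1 h2 ⊢
      by_cases hik : pvKlen c = i
      · subst hik
        simp [List.filter]
      · have hf : (pvKlen c == i) = false := by simp [hik]
        simp [hik, List.filter, hf]
    · 
      rw [pvGrowPut_of_le _ _ _ (by simp; omega)]
      rw [show max (pvMaxK xs) (pvKlen c) = pvKlen c from by omega]
      have hM : ∀ x ∈ xs, pvKlen x ≤ pvMaxK xs := pvMaxK_bound xs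
      set D := List.map (fun i => List.filter (fun c => pvKlen c == i) xs)
        (List.range (pvMaxK xs + 1)) with hD
      have hDlen : D.length = pvMaxK xs + 1 := by simp [hD]
      rw [hDlen]
      rw [show pvKlen c + 1
            = (pvMaxK xs + 1) + ((pvKlen c - (pvMaxK xs + 1)) + 1) from by omega,
        List.range_add, List.range_succ (n := pvKlen c - (pvMaxK xs + 1))]
      simp only [List.map_append, List.map_map, List.map_cons, List.map_nil,
        List.append_assoc]
      congr 1
      · -- low buckets unchanged
        rw [hD]
        apply List.map_congr_left
        intro i hi
        simp only [List.mem_range] at hi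
        rw [List.filter_append]
        have hf : (pvKlen c == i) = false := by simp; omega
        simp [List.filter, hf]
      congr 1
      · -- middle buckets are empty
        symm
        apply (List.eq_replicate_iff).mpr
        refine ⟨by simp, ?_⟩
        intro b hb
        simp only [List.mem_map, List.mem_range, Function.comp] at hb
        obtain ⟨j, hj, rfl⟩ := hb
        rw [List.filter_append]
        have hf1 : xs.filter (fun x => pvKlen x == pvMaxK xs + 1 + j) = [] := by
          rw [List.filter_eq_nil_iff]
          intro a ha
          have := hM a ha
          simp; omega
        have hf2 : (pvKlen c == pvMaxK xs + 1 + j) = false := by simp; omega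
        simp [hf1, List.filter, hf2]
      · -- top bucket is [c]
        have hkk : pvMaxK xs + 1 + (pvKlen c - (pvMaxK xs + 1)) = pvKlen c := by omega
        rw [hkk]
        have hf1 : xs.filter (fun x => pvKlen x == pvKlen c) = [] := by
          rw [List.filter_eq_nil_iff]
          intro a ha
          have := hM a ha
          simp; omega
        simp [List.filter_append, hf1, List.filter]

lemma sort_cells_eq_flatten (cells : List String) :
    sort_cells cells
    = ((List.range (pvMaxK cells + 1)).map
        (fun i => PySem.List.sorted (cells.filter (fun c => pvKlen c == i)) (fun x => x) false)).flatten := by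
  show (cells.foldl (fun ds cell => pvGrowPut ds (PySem.Str.len (pvNum cell)).toNat cell) [[]]).foldl
      (fun acc dig => acc ++ PySem.List.sorted dig (fun x => x) false) [] = _
  rw [fold_eq_buckets,
    PySem.List.foldl_append_eq_flatMap (g := fun dig => PySem.List.sorted dig (fun x => x) false),
    List.nil_append, List.flatMap_def, List.map_map]
  rfl

lemma pvSumZero (L k cnt : Nat) (h : L ≤ k) :
    ((List.range L).map (fun i => if k = i then cnt else 0)).sum = 0 := by
  induction L with
  | zero => rfl
  | succ m ih =>
    rw [List.range_succ]
    simp [ih (by omega), show k ≠ m from by omega]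

lemma pvSumDelta (L k cnt : Nat) (h : k < L) :
    ((List.range L).map (fun i => if k = i then cnt else 0)).sum = cnt := by
  induction L with
  | zero => omega
  | succ m ih =>
    rw [List.range_succ]
    by_cases hkm : k = m
    · subst hkm
      simp [pvSumZero k k cnt (le_refl k)]
    · simp [ih (by omega), hkm]

lemma sort_cells_perm (cells : List String) : (sort_cells cells).Perm cells := by
  rw [List.perm_iff_count]
  intro a
  rw [sort_cells_eq_flatten, ← List.flatMap_def, List.count_flatMap]
  simp only [Function.comp_def]
  have hcnt : ∀ i ∈ List.range (pvMaxK cells + 1),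
      List.count a (PySem.List.sorted (cells.filter (fun c => pvKlen c == i)) (fun x => x) false)
      = if pvKlen a = i then List.count a cells else 0 := by
    intro i _
    rw [(PySem.List.sorted_perm _ _ _).count_eq]
    by_cases hai : pvKlen a = i
    · rw [List.count_filter (by simp [hai]), if_pos hai]
    · rw [if_neg hai]
      apply List.count_eq_zero.mpr
      simp [List.mem_filter, hai]
  rw [List.map_congr_left hcnt]
  by_cases ha : a ∈ cells
  · exact pvSumDelta _ _ _ (by have := pvMaxK_bound cells a ha; omega)
  · have h0 : List.count a cells = 0 := List.count_eq_zero.mpr ha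
    simp [h0]

lemma sort_cells_pairwise (cells : List String) :
    (sort_cells cells).Pairwise (fun a b => pvKey a ≤ pvKey b) := by
  rw [sort_cells_eq_flatten, List.pairwise_flatten]
  constructor
  · intro l hl
    simp only [List.mem_map, List.mem_range] at hl
    obtain ⟨i, hi, rfl⟩ := hl
    refine List.Pairwise.imp_of_mem ?_ (PySem.List.sorted_pairwise _ _)
    intro x y hx hy hxy
    rw [PySem.List.mem_sorted] at hx hy
    have hxf := (List.mem_filter.mp hx).2
    have hyf := (List.mem_filter.mp hy).2
    simp only [beq_iff_eq] at hxf hyf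
    unfold pvKlen at hxf hyf
    rw [pvKey, pvKey, Prod.Lex.toLex_le_toLex]
    right
    constructor
    · have h1 := pvLen_nonneg (pvNum x)
      have h2 := pvLen_nonneg (pvNum y)
      omega
    · exact hxy
  · apply List.pairwise_map.mpr
    refine List.Pairwise.imp ?_ List.pairwise_lt_range
    intro i j hij x hx y hy
    rw [PySem.List.mem_sorted] at hx hy
    have hxf := (List.mem_filter.mp hx).2
    have hyf := (List.mem_filter.mp hy).2
    simp only [beq_iff_eq] at hxf hyf
    unfold pvKlen at hxf hyf
    rw [pvKey, pvKey, Prod.Lex.toLex_le_toLex]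
    left
    have h1 := pvLen_nonneg (pvNum x)
    have h2 := pvLen_nonneg (pvNum y)
    omega

-- ===== VERDICT (by name: the statement is the Claim_ definition above) =====
theorem sort_cells_spec : Claim_equal_sort_cells := by
  intro cells _
  unfold Spec_sort_cells
  rw [alt_eq_sorted_lex]
  exact PySem.List.eq_of_perm_of_pairwise_le_of_injective pvKey pvKey_inj
    ((sort_cells_perm cells).trans (PySem.List.sorted_perm cells pvKey false).symm)
    (sort_cells_pairwise cells) (PySem.List.sorted_pairwise cells pvKey)
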